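-- pv_equiv track=rewrite | github.com/DasLab/arnie | utils.py | convert_dotbracket_to_bp_list
-- ===== SOURCE A (Python) =====
-- def convert_dotbracket_to_bp_list(s, allow_pseudoknots=False):
--     m = {}
--     bp1=[]
--     bp2=[]
--     bp1_pk=[]
--     bp2_pk=[]
--     for i, char in enumerate(s):
--         if char=='(':
--             bp1.append(i)
--         if char==')':
--             bp2.append(i)
--         if allow_pseudoknots:
--             if char=='[':
--               bp1_pk.append(i)
--             if char==']':
--               bp2_pk.append(i)
--
--     for i in list(reversed(bp1)):
--         for j in bp2:
--             if j > i:
--                 m[i]=j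
--                 m[j]=i
--
--                 bp2.remove(j)
--                 break
--     for i in list(reversed(bp1_pk)):
--         for j in bp2_pk:
--             if j > i:
--                 m[i]=j
--                 m[j]=i
--
--                 bp2_pk.remove(j)
--                 break
--     return m
-- ===== SOURCE B (Python) =====
-- def convert_dotbracket_to_bp_list(s, allow_pseudoknots=False):
--     # single right-to-left pass per bracket type; O(n) instead of A's quadratic scan
--     def scan(open_c, close_c):
--         stack = []
--         out = []
--         for i in range(len(s) - 1, -1, -1):
--             ch = s[i]
--             if ch == close_c:
--                 stack.append(i)
--             elif ch == open_c and stack: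
--                 j = stack.pop()
--                 out.append((i, j))
--                 out.append((j, i))
--         return out
--     items = scan('(', ')')
--     if allow_pseudoknots:
--         items += scan('[', ']')
--     return dict(items)
-- ===== Notes on version B (the rewrite author's own statement) =====
-- stated objective: alternative
-- what changed: A matches each open bracket by repeatedly scanning and mutating the full list of close-bracket indices; B does one right-to-left pass per bracket type with a stack of unmatched close indices, emitting the same pairs in the same order.
import Mathlib
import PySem

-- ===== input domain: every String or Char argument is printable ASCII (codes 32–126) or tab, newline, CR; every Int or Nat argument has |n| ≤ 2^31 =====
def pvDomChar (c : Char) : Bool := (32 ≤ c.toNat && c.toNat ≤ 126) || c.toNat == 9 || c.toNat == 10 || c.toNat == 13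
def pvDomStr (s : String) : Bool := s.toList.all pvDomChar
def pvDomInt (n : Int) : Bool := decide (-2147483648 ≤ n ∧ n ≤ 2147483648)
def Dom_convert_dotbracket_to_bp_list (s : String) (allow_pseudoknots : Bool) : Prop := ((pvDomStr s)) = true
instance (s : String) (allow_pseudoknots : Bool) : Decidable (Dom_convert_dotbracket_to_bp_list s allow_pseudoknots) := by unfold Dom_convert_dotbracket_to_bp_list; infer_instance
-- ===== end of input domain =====

-- B replaces A's match-each-open-against-the-close-list loop by a single
-- right-to-left stack pass per bracket type, emitting the same pairs in the same order
-- (objective: alternative algorithm).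

-- ===== PORT A =====
-- first loop of A: collect the indices of '(' ')' and (if allow_pseudoknots) '[' ']'
def pvAPhase1 (apk : Bool) : List (Int × Char) → List Int → List Int → List Int → List Int →
    List Int × List Int × List Int × List Int
  | [], bp1, bp2, b1k, b2k => (bp1, bp2, b1k, b2k)
  | (i, ch) :: rest, bp1, bp2, b1k, b2k =>
    pvAPhase1 apk rest
      (if ch == '(' then bp1 ++ [i] else bp1)
      (if ch == ')' then bp2 ++ [i] else bp2)
      (if apk && ch == '[' then b1k ++ [i] else b1k)
      (if apk && ch == ']' then b2k ++ [i] else b2k)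

-- A's inner loop: first j in bp2 with j > i, returned together with bp2 with that j removed
def pvAInner (i : Int) : List Int → Option Int × List Int
  | [] => (none, [])
  | j :: t =>
    if i < j then (some j, t)
    else
      let r := pvAInner i t
      (r.1, j :: r.2)

-- A's outer matching loop over reversed(bp1), with the dict m and the shrinking bp2 as state
def pvAPhase2 : List Int → PySem.Dict Int Int → List Int → PySem.Dict Int Int × List Int
  | [], m, bp2 => (m, bp2)
  | i :: is, m, bp2 =>
    match pvAInner i bp2 with
    | (some j, rest) => pvAPhase2 is ((m.insert i j).insert j i) rest
    | (none, _) => pvAPhase2 is m bp2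

def convert_dotbracket_to_bp_list (s : String) (allow_pseudoknots : Bool) : List (Int × Int) :=
  let st := pvAPhase1 allow_pseudoknots (PySem.List.enumerate s.toList) [] [] [] []
  let r1 := pvAPhase2 st.1.reverse PySem.Dict.empty st.2.1
  let r2 := pvAPhase2 st.2.2.1.reverse r1.1 st.2.2.2
  r2.1.items

-- ===== PORT B =====
-- B's single right-to-left pass: chars come in decreasing index order, stack holds
-- the still-unmatched close indices seen so far (top = smallest)
def pvBScan (oc cc : Char) : List (Int × Char) → List Int → List (Int × Int)
  | [], _ => []
  | (i, ch) :: rest, stack =>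
    if ch == cc then pvBScan oc cc rest (i :: stack)
    else if ch == oc then
      match stack with
      | [] => pvBScan oc cc rest []
      | j :: st => (i, j) :: (j, i) :: pvBScan oc cc rest st
    else pvBScan oc cc rest stack

def convert_dotbracket_to_bp_list_alt (s : String) (allow_pseudoknots : Bool) : List (Int × Int) :=
  let rev := (PySem.List.enumerate s.toList).reverse
  let items := pvBScan '(' ')' rev [] ++ (if allow_pseudoknots then pvBScan '[' ']' rev [] else [])
  (items.foldl (fun (d : PySem.Dict Int Int) p => d.insert p.1 p.2) PySem.Dict.empty).items

-- ===== PRECONDITION & SPEC =====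
def Spec_convert_dotbracket_to_bp_list (s : String) (allow_pseudoknots : Bool) (out : List (Int × Int)) : Prop := out = convert_dotbracket_to_bp_list_alt s allow_pseudoknots
instance (s : String) (allow_pseudoknots : Bool) (out : List (Int × Int)) : Decidable (Spec_convert_dotbracket_to_bp_list s allow_pseudoknots out) := by unfold Spec_convert_dotbracket_to_bp_list; infer_instance

-- ===== CLAIM (what is proved, stated in full; the proofs are below) =====
def Claim_equal_convert_dotbracket_to_bp_list : Prop := ∀ (s : String) (allow_pseudoknots : Bool), Dom_convert_dotbracket_to_bp_list s allow_pseudoknots → Spec_convert_dotbracket_to_bp_list s allow_pseudoknots (convert_dotbracket_to_bp_list s allow_pseudoknots)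

-- ===== LEMMAS AND PROOFS =====

-- the indices of the characters equal to c, in order
def pvOpens (c : Char) (chars : List (Int × Char)) : List Int :=
  (chars.filter (fun p => p.2 == c)).map Prod.fst

-- the sequence of (open, close) matches A's outer loop produces
def pvMatches : List Int → List Int → List (Int × Int)
  | [], _ => []
  | i :: is, cs =>
    match pvAInner i cs with
    | (some j, rest) => (i, j) :: pvMatches is rest
    | (none, _) => pvMatches is cs

def pvExpand : List (Int × Int) → List (Int × Int)
  | [] => []
  | (i, j) :: t => (i, j) :: (j, i) :: pvExpand t

lemma pvOpens_cons (c : Char) (i : Int) (ch : Char) (rest : List (Int × Char)) :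
    pvOpens c ((i, ch) :: rest) = if ch == c then i :: pvOpens c rest else pvOpens c rest := by
  by_cases h : ch == c <;> simp [pvOpens, h]

lemma pvAPhase1_eq (apk : Bool) (chars : List (Int × Char)) :
    ∀ a b c d, pvAPhase1 apk chars a b c d =
      (a ++ pvOpens '(' chars, b ++ pvOpens ')' chars,
       c ++ (if apk then pvOpens '[' chars else []),
       d ++ (if apk then pvOpens ']' chars else [])) := by
  induction chars with
  | nil => intro a b c d; simp [pvAPhase1, pvOpens]
  | cons p rest ih =>
    intro a b c d
    obtain ⟨i, ch⟩ := p
    rw [pvAPhase1, ih]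
    refine Prod.ext ?_ (Prod.ext ?_ (Prod.ext ?_ ?_)) <;>
      simp only [pvOpens_cons] <;>
      cases apk <;>
      by_cases h1 : ch == '(' <;> by_cases h2 : ch == ')' <;>
      by_cases h3 : ch == '[' <;> by_cases h4 : ch == ']' <;>
      simp_all

lemma pvAInner_append (i : Int) (xs ys : List Int) (h : ∀ x ∈ xs, ¬ i < x) :
    pvAInner i (xs ++ ys) = ((pvAInner i ys).1, xs ++ (pvAInner i ys).2) := by
  induction xs with
  | nil => simp
  | cons x t ih =>
    have hx : ¬ i < x := h x (by simp)
    simp [pvAInner, hx, ih (fun y hy => h y (by simp [hy]))]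

lemma pvAInner_cons_gt (i j : Int) (t : List Int) (h : i < j) :
    pvAInner i (j :: t) = (some j, t) := by
  simp [pvAInner, h]

lemma pvAPhase2_fst (opens : List Int) :
    ∀ (m : PySem.Dict Int Int) (cs : List Int),
      (pvAPhase2 opens m cs).1 =
        (pvMatches opens cs).foldl (fun d p => (d.insert p.1 p.2).insert p.2 p.1) m := by
  induction opens with
  | nil => intro m cs; rfl
  | cons i is ih =>
    intro m cs
    rcases h : pvAInner i cs with ⟨o, rest⟩
    cases o <;> simp [pvAPhase2, pvMatches, h, ih]

lemma pvMem_pvOpens {c : Char} {chars : List (Int × Char)} {x : Int}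
    (hx : x ∈ pvOpens c chars) : ∃ ch, (x, ch) ∈ chars := by
  simp only [pvOpens, List.mem_map, List.mem_filter] at hx
  obtain ⟨⟨y, ch⟩, ⟨hmem, _⟩, hfst⟩ := hx
  exact ⟨ch, by simpa [← hfst] using hmem⟩

-- the key equivalence: B's stack pass computes A's match sequence (expanded), given the
-- chars in strictly decreasing index order and a stack of closes all beyond the chars
lemma pvBScan_eq (oc cc : Char) (hne : oc ≠ cc) :
    ∀ (chars : List (Int × Char)) (stack : List Int),
      List.Pairwise (fun p q : Int × Char => q.1 < p.1) chars →
      (∀ j ∈ stack, ∀ p ∈ chars, p.1 < j) →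
      pvBScan oc cc chars stack =
        pvExpand (pvMatches (pvOpens oc chars) ((pvOpens cc chars).reverse ++ stack)) := by
  intro chars
  induction chars with
  | nil => intro stack _ _; simp [pvBScan, pvOpens, pvMatches, pvExpand]
  | cons p rest ih =>
    intro stack hpw hstack
    obtain ⟨i, ch⟩ := p
    have hpw' : List.Pairwise (fun p q : Int × Char => q.1 < p.1) rest := hpw.of_cons
    have hrest_lt : ∀ q ∈ rest, q.1 < i := fun q hq => List.rel_of_pairwise_cons hpw hq
    by_cases hcc : ch == cc
    · -- push the close index
      have hoc : (ch == oc) = false := by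
        simp only [beq_iff_eq] at hcc ⊢; simp [hcc, Ne.symm hne]
      simp only [pvBScan, hcc, if_true]
      simp only [pvOpens_cons, hoc, hcc, if_true, Bool.false_eq_true, if_false]
      have hstack' : ∀ j ∈ i :: stack, ∀ q ∈ rest, q.1 < j := by
        intro j hj q hq
        rcases List.mem_cons.mp hj with rfl | hj
        · exact hrest_lt q hq
        · exact lt_trans (hrest_lt q hq) (hstack j hj (i, ch) (by simp))
      rw [ih (i :: stack) hpw' hstack']
      simp
    · have hcc' : (ch == cc) = false := by simpa using hcc
      by_cases hoc : ch == oc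
      · -- an open: A takes the first remaining close > i, which is B's stack top
        simp only [pvBScan, hcc', hoc, if_true, Bool.false_eq_true, if_false]
        simp only [pvOpens_cons, hoc, hcc', if_true, Bool.false_eq_true, if_false]
        have hR : ∀ x ∈ (pvOpens cc rest).reverse, ¬ i < x := by
          intro x hx
          obtain ⟨c', hc'⟩ := pvMem_pvOpens (List.mem_reverse.mp hx)
          exact not_lt.mpr (le_of_lt (hrest_lt _ hc'))
        cases stack with
        | nil =>
          rw [pvMatches]
          rw [pvAInner_append i _ [] hR]
          simp only [pvAInner]
          rw [ih [] hpw' (by simp)]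
        | cons j st =>
          have hij : i < j := hstack j (by simp) (i, ch) (by simp)
          rw [pvMatches, pvAInner_append i _ (j :: st) hR, pvAInner_cons_gt i j st hij]
          simp only
          rw [pvExpand, ih st hpw'
            (fun j' hj' q hq => hstack j' (by simp [hj']) q (by simp [hq]))]
      · -- irrelevant character
        have hoc' : (ch == oc) = false := by simpa using hoc
        simp only [pvBScan, hcc', hoc', Bool.false_eq_true, if_false]
        simp only [pvOpens_cons, hcc', hoc', Bool.false_eq_true, if_false]
        exact ih stack hpw' (fun j hj q hq => hstack j hj q (by simp [hq]))

lemma pvExpand_foldl (L : List (Int × Int)) :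
    ∀ d : PySem.Dict Int Int,
      (pvExpand L).foldl (fun d p => d.insert p.1 p.2) d =
        L.foldl (fun d p => (d.insert p.1 p.2).insert p.2 p.1) d := by
  induction L with
  | nil => intro d; rfl
  | cons p t ih => intro d; obtain ⟨i, j⟩ := p; simp [pvExpand, ih]

lemma pvOpens_reverse (c : Char) (chars : List (Int × Char)) :
    pvOpens c chars.reverse = (pvOpens c chars).reverse := by
  simp [pvOpens, List.filter_reverse, List.map_reverse]

-- ===== VERDICT (by name: the statement is the Claim_ definition above) =====
theorem convert_dotbracket_to_bp_list_spec : Claim_equal_convert_dotbracket_to_bp_list := by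
  intro s apk _
  unfold Spec_convert_dotbracket_to_bp_list
  unfold convert_dotbracket_to_bp_list convert_dotbracket_to_bp_list_alt
  set enum := PySem.List.enumerate s.toList with henum
  have hpw : List.Pairwise (fun p q : Int × Char => q.1 < p.1) enum.reverse := by
    rw [List.pairwise_reverse]
    exact PySem.List.pairwise_lt_enumerate s.toList 0
  have hmain := pvBScan_eq '(' ')' (by decide) enum.reverse [] hpw (by simp)
  rw [pvAPhase1_eq]
  simp only [List.nil_append]
  rw [pvAPhase2_fst, pvAPhase2_fst]
  rw [hmain, pvOpens_reverse, pvOpens_reverse, List.reverse_reverse, List.append_nil]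
  cases apk with
  | false =>
    simp only [Bool.false_eq_true, if_false]
    simp [pvMatches, pvExpand_foldl]
  | true =>
    have hpk := pvBScan_eq '[' ']' (by decide) enum.reverse [] hpw (by simp)
    rw [hpk, pvOpens_reverse, pvOpens_reverse, List.reverse_reverse, List.append_nil]
    simp only [if_true]
    rw [List.foldl_append, pvExpand_foldl, pvExpand_foldl]
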